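-- pv_equiv track=rewrite | github.com/vanden/code_challenges | leetcode/brickWall.py | bestJointCut
-- ===== SOURCE A (Python) =====
-- def bestJointCut(cuts):
--     best = -1
--     for cutIndex in range(1, cuts[0][-1]):
--         jointCount = 0
--         for cut in cuts:
--             if cutIndex in cut:
--                 jointCount += 1
--         best = max(best, jointCount)
--     return best
-- ===== SOURCE B (Python) =====
-- def bestJointCut(cuts):
--     width = cuts[0][-1]
--     if width <= 1:
--         return -1
--     freq = {}
--     best = 0
--     for cut in cuts:
--         for v in set(cut):
--             if 1 <= v < width:
--                 c = freq.get(v, 0) + 1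
--                 freq[v] = c
--                 if c > best:
--                     best = c
--     return best
-- ===== Notes on version B (the rewrite author's own statement) =====
-- stated objective: faster
-- what changed: A scans every cut position 1..width-1 and, for each, rescans all rows for membership; B makes a single pass over the rows, counting each in-range distinct joint position in a frequency dict while tracking the running maximum.
-- outside the precondition, e.g. on bestJointCut([]): A raises IndexError, B raises IndexError; on bestJointCut([[]]): A raises IndexError, B raises IndexError
import Mathlib
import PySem

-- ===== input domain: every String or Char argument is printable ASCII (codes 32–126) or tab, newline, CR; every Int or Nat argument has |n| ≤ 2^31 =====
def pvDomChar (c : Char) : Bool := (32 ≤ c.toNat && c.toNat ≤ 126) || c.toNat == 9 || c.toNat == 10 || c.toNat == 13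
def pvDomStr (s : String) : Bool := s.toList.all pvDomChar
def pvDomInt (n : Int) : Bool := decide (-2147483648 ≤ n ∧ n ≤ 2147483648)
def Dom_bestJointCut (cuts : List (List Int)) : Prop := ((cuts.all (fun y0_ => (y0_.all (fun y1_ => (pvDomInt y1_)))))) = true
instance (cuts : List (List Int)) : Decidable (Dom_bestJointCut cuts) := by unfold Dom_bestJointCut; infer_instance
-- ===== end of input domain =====

-- B replaces A's scan of every cut position (O(W·R·L)) by a single pass that counts
-- joints in a frequency dict with a running maximum (O(R·L)); objective: faster.

-- ===== PORT A =====
-- literal transliteration of A: for each cutIndex in range(1, cuts[0][-1]) count the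
-- rows containing it, keep the running max starting from -1.
def bestJointCut (cuts : List (List Int)) : Int :=
  let W := (PySem.List.pyGet? ((PySem.List.pyGet? cuts 0).getD []) (-1)).getD 0
  (PySem.List.pyRange 1 W).foldl
    (fun best cutIndex =>
      max best
        (cuts.foldl
          (fun jointCount cut => if cut.contains cutIndex then jointCount + 1 else jointCount)
          0))
    (-1)

-- ===== PORT B =====
-- literal transliteration of Source B: one pass over the rows; for each distinct joint
-- position v of a row with 1 <= v < width, bump freq[v] and the running best.
-- (Python's set iteration order is unspecified; it only affects the dict layout,
-- never the returned Int, so iterating PySem.Set.ofList's order is exact here.)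
def bStep (width : Int) (st : PySem.Dict Int Int × Int) (v : Int) : PySem.Dict Int Int × Int :=
  if 1 ≤ v ∧ v < width then
    (st.1.insert v (st.1.getD v 0 + 1),
     if st.1.getD v 0 + 1 > st.2 then st.1.getD v 0 + 1 else st.2)
  else st

def bRow (width : Int) (st : PySem.Dict Int Int × Int) (cut : List Int) : PySem.Dict Int Int × Int :=
  (PySem.Set.ofList cut).foldl (bStep width) st

def bestJointCut_alt (cuts : List (List Int)) : Int :=
  let width := (PySem.List.pyGet? ((PySem.List.pyGet? cuts 0).getD []) (-1)).getD 0
  if width ≤ 1 then -1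
  else (cuts.foldl (bRow width) (PySem.Dict.empty, 0)).2

-- ===== PRECONDITION & SPEC =====
-- Pre_ excludes exactly the inputs where the Python A raises IndexError:
-- cuts == [] (cuts[0] fails) or cuts[0] == [] (cuts[0][-1] fails).
def Pre_bestJointCut (cuts : List (List Int)) : Prop := cuts ≠ [] ∧ cuts.headI ≠ []
instance (cuts : List (List Int)) : Decidable (Pre_bestJointCut cuts) := by
  unfold Pre_bestJointCut; infer_instance

def pvWitness_bestJointCut : List (List Int) := [[1, 2, 4], [2, 4], [3, 4]]

def Spec_bestJointCut (cuts : List (List Int)) (out : Int) : Prop := out = bestJointCut_alt cuts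
instance (cuts : List (List Int)) (out : Int) : Decidable (Spec_bestJointCut cuts out) := by unfold Spec_bestJointCut; infer_instance

-- ===== CLAIM (what is proved, stated in full; the proofs are below) =====
def Claim_equal_bestJointCut : Prop := ∀ (cuts : List (List Int)), Dom_bestJointCut cuts → Pre_bestJointCut cuts → Spec_bestJointCut cuts (bestJointCut cuts)

-- ===== LEMMAS AND PROOFS =====

-- max over the cut positions 1..W-1 of g, floored at 0 (the shape both ports reduce to)
def supW (W : Int) (g : Int → Int) : Int :=
  ((PySem.List.pyRange 1 W).map g).foldl max 0

-- number of rows of `cuts` containing position i (A's inner loop)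
def cnt (cuts : List (List Int)) (i : Int) : Int :=
  cuts.foldl (fun jc cut => if cut.contains i then jc + 1 else jc) 0

lemma cnt_eq_countP (cuts : List (List Int)) (i : Int) :
    cnt cuts i = (cuts.countP (fun cut => cut.contains i) : Int) := by
  unfold cnt; rw [PySem.List.foldl_count_if]; ring

lemma cnt_nonneg (cuts : List (List Int)) (i : Int) : 0 ≤ cnt cuts i := by
  rw [cnt_eq_countP]; positivity

lemma cnt_cons (cut : List Int) (rest : List (List Int)) (i : Int) :
    cnt (cut :: rest) i = (if i ∈ cut then 1 else 0) + cnt rest i := by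
  simp only [cnt_eq_countP, List.countP_cons, List.contains_iff_mem]
  split_ifs <;> push_cast <;> ring

lemma foldl_max_le_iff (M : List Int) (a c : Int) :
    M.foldl max a ≤ c ↔ (a ≤ c ∧ ∀ x ∈ M, x ≤ c) := by
  induction M generalizing a with
  | nil => simp
  | cons y t ih =>
    simp only [List.foldl_cons, ih, List.mem_cons]
    constructor
    · rintro ⟨h1, h2⟩
      refine ⟨le_trans (le_max_left a y) h1, fun x hx => ?_⟩
      rcases hx with h | hx
      · rw [h]; exact le_trans (le_max_right a y) h1
      · exact h2 x hx
    · rintro ⟨h1, h2⟩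
      exact ⟨max_le h1 (h2 y (Or.inl rfl)), fun x hx => h2 x (Or.inr hx)⟩

lemma supW_nonneg (W : Int) (g : Int → Int) : 0 ≤ supW W g :=
  (PySem.List.le_foldl_max _ 0).1

lemma mem_le_supW (W : Int) (g : Int → Int) (i : Int) (h : 1 ≤ i ∧ i < W) :
    g i ≤ supW W g :=
  (PySem.List.le_foldl_max _ 0).2 _ (List.mem_map_of_mem (PySem.List.mem_pyRange_one.2 h))

lemma supW_congr (W : Int) {g h : Int → Int} (he : ∀ i, 1 ≤ i → i < W → g i = h i) :
    supW W g = supW W h := by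
  unfold supW
  rw [List.map_congr_left (fun i hi => by
    rcases PySem.List.mem_pyRange_one.1 hi with ⟨h1, h2⟩
    exact he i h1 h2)]

lemma supW_le_iff (W : Int) (g : Int → Int) (c : Int) :
    supW W g ≤ c ↔ (0 ≤ c ∧ ∀ i, 1 ≤ i → i < W → g i ≤ c) := by
  unfold supW
  rw [foldl_max_le_iff]
  constructor
  · rintro ⟨h0, h1⟩
    exact ⟨h0, fun i hi1 hi2 =>
      h1 _ (List.mem_map_of_mem (PySem.List.mem_pyRange_one.2 ⟨hi1, hi2⟩))⟩
  · rintro ⟨h0, h1⟩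
    refine ⟨h0, fun x hx => ?_⟩
    rcases List.mem_map.1 hx with ⟨i, hi, rfl⟩
    rcases PySem.List.mem_pyRange_one.1 hi with ⟨h1', h2'⟩
    exact h1 i h1' h2'

lemma supW_zero (W : Int) : supW W (fun _ => 0) = 0 :=
  le_antisymm ((supW_le_iff W _ 0).2 ⟨le_refl 0, fun _ _ _ => le_refl 0⟩) (supW_nonneg W _)

-- bumping g at one in-range position v bumps the sup to max(old sup, g v + 1)
lemma supW_update (W : Int) (g g' : Int → Int) (v : Int) (hv : 1 ≤ v ∧ v < W)
    (hgv : g' v = g v + 1) (hne : ∀ i, i ≠ v → g' i = g i) :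
    supW W g' = max (supW W g) (g v + 1) := by
  apply le_antisymm
  · rw [supW_le_iff]
    refine ⟨le_trans (supW_nonneg W g) (le_max_left _ _), fun i h1 h2 => ?_⟩
    by_cases hiv : i = v
    · subst hiv; rw [hgv]; exact le_max_right _ _
    · rw [hne i hiv]; exact le_trans (mem_le_supW W g i ⟨h1, h2⟩) (le_max_left _ _)
  · apply max_le
    · rw [supW_le_iff]
      refine ⟨supW_nonneg W g', fun i h1 h2 => ?_⟩
      by_cases hiv : i = v
      · subst hiv
        calc g i ≤ g i + 1 := by omega
          _ = g' i := hgv.symm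
          _ ≤ supW W g' := mem_le_supW W g' i ⟨h1, h2⟩
      · rw [← hne i hiv]; exact mem_le_supW W g' i ⟨h1, h2⟩
    · rw [← hgv]; exact mem_le_supW W g' v hv

-- one row of B's loop: the dict gains 1 at each in-range member of the (distinct) list t,
-- and the running best stays the sup over positions of the dict's counts
lemma bInner (W : Int) (t : List Int) (ht : t.Nodup) :
    ∀ (d : PySem.Dict Int Int) (best : Int),
    best = supW W (fun i => d.getD i 0) →
    (∀ i, (t.foldl (bStep W) (d, best)).1.getD i 0
        = d.getD i 0 + (if i ∈ t ∧ 1 ≤ i ∧ i < W then 1 else 0))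
    ∧ (t.foldl (bStep W) (d, best)).2
        = supW W (fun i => (t.foldl (bStep W) (d, best)).1.getD i 0) := by
  induction t with
  | nil =>
    intro d best hbest
    refine ⟨fun i => by simp, by simpa using hbest⟩
  | cons v rest ih =>
    intro d best hbest
    rw [List.nodup_cons] at ht
    obtain ⟨hv, ht'⟩ := ht
    by_cases hc : 1 ≤ v ∧ v < W
    · have hstep : bStep W (d, best) v
          = (d.insert v (d.getD v 0 + 1),
             if d.getD v 0 + 1 > best then d.getD v 0 + 1 else best) := by
        simp [bStep, hc]
      have hbest1 : (if d.getD v 0 + 1 > best then d.getD v 0 + 1 else best)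
          = supW W (fun i => (d.insert v (d.getD v 0 + 1)).getD i 0) := by
        rw [supW_update W (fun i => d.getD i 0) _ v hc
            (by simp)
            (fun i hiv => by simp [PySem.Dict.getD_insert, hiv]),
          ← hbest]
        omega
      obtain ⟨h1, h2⟩ := ih ht' (d.insert v (d.getD v 0 + 1))
        (if d.getD v 0 + 1 > best then d.getD v 0 + 1 else best) hbest1
      rw [List.foldl_cons, hstep]
      refine ⟨fun i => ?_, h2⟩
      rw [h1 i, PySem.Dict.getD_insert]
      by_cases hiv : i = v
      · subst hiv; simp [hv, hc]
      · simp [hiv, List.mem_cons]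
    · have hstep : bStep W (d, best) v = (d, best) := by simp [bStep, hc]
      obtain ⟨h1, h2⟩ := ih ht' d best hbest
      rw [List.foldl_cons, hstep]
      refine ⟨fun i => ?_, h2⟩
      rw [h1 i]
      by_cases hiv : i = v
      · subst hiv; simp [hc]
      · simp [List.mem_cons, hiv]

-- B's whole loop: starting from a dict tabulating g (zero off-range), the final best
-- is the sup over positions of g plus the joint counts of the remaining rows
lemma bOuter (W : Int) (rows : List (List Int)) :
    ∀ (d : PySem.Dict Int Int) (best : Int) (g : Int → Int),
    (∀ i, d.getD i 0 = g i) →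
    best = supW W g →
    (rows.foldl (bRow W) (d, best)).2
      = supW W (fun i => g i + (if 1 ≤ i ∧ i < W then cnt rows i else 0)) := by
  induction rows with
  | nil =>
    intro d best g hd hbest
    have : (fun i => g i + (if 1 ≤ i ∧ i < W then cnt ([] : List (List Int)) i else 0)) = g := by
      funext i; simp [cnt]
    rw [List.foldl_nil, this]
    exact hbest
  | cons cut rest ih =>
    intro d best g hd hbest
    have hbest' : best = supW W (fun i => d.getD i 0) :=
      hbest.trans (supW_congr W (fun i _ _ => hd i)).symm
    obtain ⟨h1, h2⟩ := bInner W (PySem.Set.ofList cut) (PySem.Set.nodup_ofList cut) d best hbest'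
    have hd1 : ∀ i, (bRow W (d, best) cut).1.getD i 0
        = g i + (if i ∈ cut ∧ 1 ≤ i ∧ i < W then 1 else 0) := by
      intro i
      rw [show bRow W (d, best) cut = (PySem.Set.ofList cut).foldl (bStep W) (d, best) from rfl,
        h1 i, hd i]
      simp [PySem.Set.mem_ofList]
    have hbest1 : (bRow W (d, best) cut).2
        = supW W (fun i => g i + (if i ∈ cut ∧ 1 ≤ i ∧ i < W then 1 else 0)) := by
      rw [show bRow W (d, best) cut = (PySem.Set.ofList cut).foldl (bStep W) (d, best) from rfl,
        h2]
      exact supW_congr W (fun i _ _ => hd1 i)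
    rw [List.foldl_cons]
    rw [ih (bRow W (d, best) cut).1 (bRow W (d, best) cut).2 _ hd1 hbest1]
    congr 1
    funext i
    rw [cnt_cons]
    by_cases hc : 1 ≤ i ∧ i < W
    · by_cases hm : i ∈ cut <;> (simp [hc, hm]; try ring)
    · simp [hc]

lemma foldl_max_neg_one (M : List Int) (x0 : Int) (hx0 : x0 ∈ M) (h0 : 0 ≤ x0) :
    M.foldl max (-1) = M.foldl max 0 := by
  apply le_antisymm
  · rw [foldl_max_le_iff]
    refine ⟨le_trans (by omega : (-1 : Int) ≤ 0) ((PySem.List.le_foldl_max M 0).1),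
      fun x hx => (PySem.List.le_foldl_max M 0).2 x hx⟩
  · rw [foldl_max_le_iff]
    exact ⟨le_trans h0 ((PySem.List.le_foldl_max M (-1)).2 x0 hx0),
      fun x hx => (PySem.List.le_foldl_max M (-1)).2 x hx⟩

-- ===== VERDICT (by name: the statement is the Claim_ definition above) =====
theorem bestJointCut_spec : Claim_equal_bestJointCut := by
  intro cuts _ _
  unfold Spec_bestJointCut
  simp only [bestJointCut, bestJointCut_alt]
  set W := (PySem.List.pyGet? ((PySem.List.pyGet? cuts 0).getD []) (-1)).getD 0 with hW
  by_cases hw : W ≤ 1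
  · rw [if_pos hw, PySem.List.pyRange_one_eq_nil hw, List.foldl_nil]
  · rw [if_neg hw]
    rw [bOuter W cuts PySem.Dict.empty 0 (fun _ => 0)
      (fun i => PySem.Dict.getD_empty i 0) (supW_zero W).symm]
    have hcongr : supW W (fun i => (fun _ => (0 : Int)) i + (if 1 ≤ i ∧ i < W then cnt cuts i else 0))
        = supW W (cnt cuts) := supW_congr W (fun i h1 h2 => by simp [h1, h2])
    rw [hcongr]
    show (PySem.List.pyRange 1 W).foldl (fun b i => max b (cnt cuts i)) (-1) = supW W (cnt cuts)
    rw [← List.foldl_map (f := cnt cuts) (g := max)]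
    unfold supW
    exact foldl_max_neg_one _ (cnt cuts 1)
      (List.mem_map_of_mem (PySem.List.mem_pyRange_one.2 ⟨le_refl 1, by omega⟩))
      (cnt_nonneg cuts 1)
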